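-- pv_equiv track=rewrite | github.com/Mugamta/Boostcamp_AITech5_CV11 | 2024/08.03/박수영_프로그래머스_롤케이크_자르기.py | solution
-- ===== SOURCE A (Python) =====
-- from collections import deque, defaultdict, Counter
--
-- def solution(topping):
--     """
--     goal: 롤케이크를 공평하게 자르는 방법의 수 구하기
--     note:
--         - 롤케이크를 두 조각으로 나누되, 각 조각에 *동일한 가짓수의 토핑이 올라가야 함*
--     how:
--         - 큐와 사전을 이용한 구현
--     """
--     n_case = 0
--
--     # 효율적인 탐색을 위해 deque, dict 및 count 목적의 변수를 사용
--     piece_a, piece_b = deque(), deque(topping)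
--     pa_dict, pb_dict = defaultdict(int), dict(Counter(topping))
--     n_pa_topping, n_pb_topping = 0, len(pb_dict)
--
--     while piece_b:
--         t = piece_b.popleft() # 두 번째 조각으로부터 토핑 하나를 꺼내서
--         piece_a.append(t) # 첫 번째 조각에 추가함
--
--         if not pa_dict[t]: # 기존에 없던, 새로운 종류의 토핑이라면
--             n_pa_topping += 1 # 첫 번째 조각의 토핑 종류를 증가
--
--         pa_dict[t] += 1 # 첫 번째 조각의 토핑 정보 갱신
--
--         pb_dict[t] -= 1 # 두 번째 조각의 토핑 정보 갱신
--
--         if not pb_dict[t]: # 더 이상 해당 종류의 토핑이 존재하지 않는다면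
--             n_pb_topping -= 1 # 두 번째 조각의 토핑 종류를 감소
--
--         # 두 조각의 토핑 종류가 같은 경우, count
--         if n_pa_topping == n_pb_topping:
--             n_case += 1
--
--     return n_case
-- ===== SOURCE B (Python) =====
-- def solution(topping):
--     n = len(topping)
--     # table pass: right[i] = number of distinct toppings in topping[i:]
--     right = [0] * (n + 1)
--     seen = set()
--     for i in range(n - 1, -1, -1):
--         seen.add(topping[i])
--         right[i] = len(seen)
--     # comparison pass: grow the left set and compare against the table
--     seen = set()
--     count = 0
--     for i in range(n):
--         seen.add(topping[i])
--         if len(seen) == right[i + 1]: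
--             count += 1
--     return count
-- ===== Notes on version B (the rewrite author's own statement) =====
-- stated objective: alternative
-- what changed: Replaces A's single fused sweep (two mutable count dicts with incremental distinct counters updated per pop) by two separate passes: first materialize a suffix table right[i] = distinct count of topping[i:] with a set scanned from the end, then a forward pass growing a left set and comparing its size to the table entry.
import Mathlib
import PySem

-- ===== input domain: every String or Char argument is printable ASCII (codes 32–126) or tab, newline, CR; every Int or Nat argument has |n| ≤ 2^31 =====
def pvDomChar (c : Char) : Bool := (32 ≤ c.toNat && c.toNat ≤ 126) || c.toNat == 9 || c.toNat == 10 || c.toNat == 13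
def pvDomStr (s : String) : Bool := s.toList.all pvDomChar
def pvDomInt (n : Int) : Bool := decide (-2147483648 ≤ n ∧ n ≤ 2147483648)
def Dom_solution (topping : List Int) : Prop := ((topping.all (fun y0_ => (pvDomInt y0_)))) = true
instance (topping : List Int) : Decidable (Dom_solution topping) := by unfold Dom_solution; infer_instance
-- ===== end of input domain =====

-- B replaces A's fused incremental sweep by a suffix-distinct table pass plus a forward comparison pass (objective: alternative decomposition, same cost).

-- ===== PORT A =====
def solLoop (piece_b : List Int) (piece_a : List Int) (pa : PySem.Dict Int Int)
    (pb : PySem.Dict Int Int) (n_pa n_pb n_case : Int) : Int :=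
  match piece_b with
  | [] => n_case
  | t :: rest =>
    let piece_a' := piece_a ++ [t]
    let n_pa' := if pa.getD t 0 = 0 then n_pa + 1 else n_pa
    let pa' := pa.insert t (pa.getD t 0 + 1)
    let pb' := pb.insert t (pb.getD t 0 - 1)
    let n_pb' := if pb'.getD t 0 = 0 then n_pb - 1 else n_pb
    let n_case' := if n_pa' = n_pb' then n_case + 1 else n_case
    solLoop rest piece_a' pa' pb' n_pa' n_pb' n_case'

def solution (topping : List Int) : Int :=
  solLoop topping [] PySem.Dict.empty (PySem.Dict.counter topping) 0
    ((PySem.Dict.counter topping).size) 0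

-- ===== PORT B =====
-- backward table pass: returns (set of elements seen, [right_0, …, right_n]) with right_n = 0
def buildRight : List Int → PySem.Set Int × List Int
  | [] => ([], [0])
  | t :: rest =>
    let st := buildRight rest
    let seen := PySem.Set.add st.1 t
    (seen, PySem.Set.len seen :: st.2)

-- forward comparison pass: tab is aligned so its head is right[i+1]
def forwardLoop : List Int → List Int → PySem.Set Int → Int → Int
  | [], _, _, count => count
  | t :: rest, tab, seen, count =>
    let seen' := PySem.Set.add seen t
    let count' := if PySem.Set.len seen' = tab.headD 0 then count + 1 else count
    forwardLoop rest tab.tail seen' count'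

def solution_alt (topping : List Int) : Int :=
  forwardLoop topping ((buildRight topping).2.tail) PySem.Set.empty 0

-- ===== PRECONDITION & SPEC =====
def Spec_solution (topping : List Int) (out : Int) : Prop := out = solution_alt topping
instance (topping : List Int) (out : Int) : Decidable (Spec_solution topping out) := by unfold Spec_solution; infer_instance

-- ===== CLAIM (what is proved, stated in full; the proofs are below) =====
def Claim_equal_solution : Prop := ∀ (topping : List Int), Dom_solution topping → Spec_solution topping (solution topping)

-- ===== LEMMAS AND PROOFS =====

-- distinct count of a list
def dc (l : List Int) : Nat := (PySem.Set.ofList l).length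

-- common reference: fold over the remaining suffix with the left set as accumulator
def gRef : PySem.Set Int → List Int → Int
  | _, [] => 0
  | seen, t :: rest =>
    (if PySem.Set.len (PySem.Set.add seen t) = (dc rest : Int) then 1 else 0) + gRef (PySem.Set.add seen t) rest

-- distinct counts of the proper suffixes
def suffDC : List Int → List Int
  | [] => []
  | _ :: rest => (dc rest : Int) :: suffDC rest

theorem len_eq_of_nodup_ext (s t : List Int) (hs : s.Nodup) (ht : t.Nodup)
    (h : ∀ x, x ∈ s ↔ x ∈ t) : s.length = t.length :=
  ((List.perm_ext_iff_of_nodup hs ht).2 h).length_eq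

theorem set_add_length (s : PySem.Set Int) (t : Int) :
    (PySem.Set.add s t).length = if t ∈ s then s.length else s.length + 1 := by
  simp [PySem.Set.add, PySem.Set.contains]
  split_ifs <;> simp_all

theorem set_add_nodup (s : PySem.Set Int) (t : Int) (hs : s.Nodup) :
    (PySem.Set.add s t).Nodup := by
  simp [PySem.Set.add, PySem.Set.contains]
  split_ifs with h
  · exact hs
  · refine List.Nodup.append hs (List.nodup_singleton t) ?_
    simp [List.disjoint_singleton]
    exact h

theorem dc_cons (t : Int) (l : List Int) :
    dc (t :: l) = (PySem.Set.add (PySem.Set.ofList l) t).length := by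
  apply len_eq_of_nodup_ext
  · exact PySem.Set.nodup_ofList _
  · exact set_add_nodup _ _ (PySem.Set.nodup_ofList _)
  · intro x
    simp [PySem.Set.mem_ofList]
    tauto

theorem ofList_append_singleton (p : List Int) (t : Int) :
    PySem.Set.ofList (p ++ [t]) = PySem.Set.add (PySem.Set.ofList p) t := by
  simp [PySem.Set.ofList_eq_foldl, List.foldl_append]

theorem dc_append_singleton (p : List Int) (t : Int) :
    dc (p ++ [t]) = if t ∈ p then dc p else dc p + 1 := by
  rw [dc, ofList_append_singleton, set_add_length]
  simp [PySem.Set.mem_ofList, dc]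

theorem dc_cons' (t : Int) (rest : List Int) :
    dc (t :: rest) = if t ∈ rest then dc rest else dc rest + 1 := by
  rw [dc_cons, set_add_length]
  simp [PySem.Set.mem_ofList, dc]

theorem len_add_ofList_append (p : List Int) (t : Int) :
    PySem.Set.len (PySem.Set.add (PySem.Set.ofList p) t) = (dc (p ++ [t]) : Int) := by
  rw [dc, ofList_append_singleton]
  simp [PySem.Set.len]

-- A's loop computes gRef on the remaining suffix, given its state invariants
theorem solLoop_eq (rest : List Int) : ∀ (p pieceA : List Int) (pa pb : PySem.Dict Int Int)
    (npa npb ncase : Int),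
    (∀ x, pa.getD x 0 = (p.count x : Int)) →
    (∀ x, pb.getD x 0 = (rest.count x : Int)) →
    npa = (dc p : Int) → npb = (dc rest : Int) →
    solLoop rest pieceA pa pb npa npb ncase = ncase + gRef (PySem.Set.ofList p) rest := by
  induction rest with
  | nil => intro p pieceA pa pb npa npb ncase _ _ _ _; simp [solLoop, gRef]
  | cons t rest ih =>
    intro p pieceA pa pb npa npb ncase hpa hpb hnpa hnpb
    have hgetb : ∀ x, (pb.insert t (pb.getD t 0 - 1)).getD x 0 = (rest.count x : Int) := by
      intro x
      rw [PySem.Dict.getD_insert]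
      rcases eq_or_ne x t with rfl | hx
      · rw [if_pos rfl, hpb]; simp [List.count_cons_self]
      · rw [if_neg hx, hpb]; simp [hx.symm]
    have hconda : (pa.getD t 0 = 0) ↔ t ∉ p := by
      rw [hpa]; exact_mod_cast List.count_eq_zero
    have hcondb : ((pb.insert t (pb.getD t 0 - 1)).getD t 0 = 0) ↔ t ∉ rest := by
      rw [hgetb]; exact_mod_cast List.count_eq_zero
    have h3 : (if pa.getD t 0 = 0 then npa + 1 else npa) = (dc (p ++ [t]) : Int) := by
      rw [hnpa, dc_append_singleton]
      by_cases hp : t ∈ p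
      · rw [if_neg (by rw [hconda]; simp [hp]), if_pos hp]
      · rw [if_pos (hconda.2 hp), if_neg hp]; push_cast; ring
    have h4 : (if (pb.insert t (pb.getD t 0 - 1)).getD t 0 = 0 then npb - 1 else npb)
        = (dc rest : Int) := by
      rw [hnpb, dc_cons' t rest]
      by_cases hr : t ∈ rest
      · rw [if_neg (by rw [hcondb]; simp [hr]), if_pos hr]
      · rw [if_pos (hcondb.2 hr), if_neg hr]; push_cast; ring
    have key := ih (p ++ [t]) (pieceA ++ [t]) (pa.insert t (pa.getD t 0 + 1))
        (pb.insert t (pb.getD t 0 - 1))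
        (if pa.getD t 0 = 0 then npa + 1 else npa)
        (if (pb.insert t (pb.getD t 0 - 1)).getD t 0 = 0 then npb - 1 else npb)
        (if (if pa.getD t 0 = 0 then npa + 1 else npa)
            = (if (pb.insert t (pb.getD t 0 - 1)).getD t 0 = 0 then npb - 1 else npb)
          then ncase + 1 else ncase)
        ?_ hgetb h3 h4
    · simp only [solLoop]
      rw [key, h3, h4]
      simp only [gRef, len_add_ofList_append, ofList_append_singleton]
      split_ifs <;> omega
    · intro x
      rw [PySem.Dict.getD_insert]
      rcases eq_or_ne x t with rfl | hx
      · rw [if_pos rfl, hpa]; simp [List.count_append]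
      · rw [if_neg hx, hpa]; simp [List.count_append, List.count_eq_zero, hx]

theorem solution_eq_gRef (topping : List Int) :
    solution topping = gRef PySem.Set.empty topping := by
  unfold solution
  rw [solLoop_eq topping [] [] _ _ _ _ _ (by simp [PySem.Dict.getD_empty])
      (by intro x; rw [PySem.Dict.getD_counter]) (by simp [dc, PySem.Set.ofList])
      (by rw [show ((PySem.Dict.counter topping).size : Int) = ((PySem.Dict.counter topping).keys.length : Int) by simp [PySem.Dict.size, PySem.Dict.keys], PySem.Dict.keys_counter]; simp [dc])]
  simp [PySem.Set.ofList, PySem.Set.empty]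

-- B's table really is the suffix-distinct table, and its set is a nodup cover of the list
theorem buildRight_spec (l : List Int) :
    (buildRight l).1.Nodup ∧ (∀ x, x ∈ (buildRight l).1 ↔ x ∈ l) ∧
      (buildRight l).2 = (dc l : Int) :: suffDC l := by
  induction l with
  | nil => refine ⟨List.nodup_nil, by simp [buildRight], ?_⟩; simp [buildRight, dc, PySem.Set.ofList, suffDC]
  | cons t rest ih =>
    obtain ⟨hnd, hmem, htab⟩ := ih
    refine ⟨set_add_nodup _ _ hnd, ?_, ?_⟩
    · intro x
      simp [buildRight, hmem]
      tauto
    · have hlen : (PySem.Set.add (buildRight rest).1 t).length = dc (t :: rest) := by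
        rw [dc_cons]
        apply len_eq_of_nodup_ext _ _ (set_add_nodup _ _ hnd)
          (set_add_nodup _ _ (PySem.Set.nodup_ofList _))
        intro x
        simp [hmem, PySem.Set.mem_ofList]
      simp [buildRight, htab, suffDC, PySem.Set.len, hlen]

theorem forwardLoop_eq (rest : List Int) : ∀ (seen : PySem.Set Int) (count : Int),
    forwardLoop rest (suffDC rest) seen count = count + gRef seen rest := by
  induction rest with
  | nil => intro seen count; simp [forwardLoop, gRef]
  | cons t rest ih =>
    intro seen count
    simp only [forwardLoop, suffDC, List.headD_cons, List.tail_cons, gRef]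
    rw [ih]
    split_ifs <;> omega

-- ===== VERDICT (by name: the statement is the Claim_ definition above) =====
theorem solution_spec : Claim_equal_solution := by
  intro topping _
  unfold Spec_solution solution_alt
  rw [(buildRight_spec topping).2.2]
  simp only [List.tail_cons]
  rw [forwardLoop_eq, solution_eq_gRef]
  simp
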